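-- pv_equiv track=rewrite | github.com/kimiwang345/zjh_robot | jh_robot_2.0/zjh_hand_eval.py | get_hand_rank
-- ===== SOURCE A (Python) =====
-- from typing import List, Tuple
-- from typing import List, Tuple
--
-- Card = Tuple[int, int]  # (rank, suit), rank: 2~14(A), suit: 0~3
--
-- def get_hand_rank(cards: List[Card]) -> int:
--     """
--     返回 0~5 的牌型 bucket
--     0 高牌
--     1 对子
--     2 顺子
--     3 金花
--     4 顺金
--     5 炸弹
--     """
--
--     assert len(cards) == 3, "炸金花必须是 3 张牌"
--
--     ranks = sorted([c[0] for c in cards])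
--     suits = [c[1] for c in cards]
--
--     # ========= 炸弹（3 张同点数） =========
--     if ranks[0] == ranks[1] == ranks[2]:
--         return 5
--
--     # ========= 是否同花 =========
--     is_flush = (suits[0] == suits[1] == suits[2])
--
--     # ========= 是否顺子 =========
--     # 特判 A-2-3
--     if ranks == [2, 3, 14]:
--         is_straight = True
--     else:
--         is_straight = (ranks[0] + 1 == ranks[1] and ranks[1] + 1 == ranks[2])
--
--     # ========= 顺金 =========
--     if is_flush and is_straight:
--         return 4
--
--     # ========= 金花 =========
--     if is_flush:
--         return 3
--
--     # ========= 顺子 =========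
--     if is_straight:
--         return 2
--
--     # ========= 对子 =========
--     if ranks[0] == ranks[1] or ranks[1] == ranks[2]:
--         return 1
--
--     # ========= 高牌 =========
--     return 0
-- ===== SOURCE B (Python) =====
-- def get_hand_rank(cards):
--     assert len(cards) == 3, "炸金花必须是 3 张牌"
--     # one pass: min, max and sum of ranks, plus a flush flag; no sorting
--     lo = hi = cards[0][0]
--     s0 = cards[0][1]
--     total = 0
--     flush = True
--     for r, s in cards:
--         total += r
--         if r < lo:
--             lo = r
--         if r > hi:
--             hi = r
--         if s != s0:
--             flush = False
--     if lo == hi: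
--         return 5  # bomb
--     mid = total - lo - hi  # the middle rank, recovered arithmetically
--     if mid == lo or mid == hi:
--         return 1  # pair
--     # three distinct ranks
--     straight = hi - lo == 2 or (lo == 2 and hi == 14 and mid == 3)
--     if flush:
--         return 4 if straight else 3
--     return 2 if straight else 0
-- ===== Notes on version B (the rewrite author's own statement) =====
-- stated objective: alternative
-- what changed: B never sorts: a single pass accumulates the minimum, maximum and sum of the ranks plus a flush flag, recovers the middle rank as sum-min-max, and classifies from those (min==max -> bomb, mid==min or mid==max -> pair, then straight via max-min==2 or the 2/3/14 wheel), replacing A's sort-then-cascade over indexed sorted ranks.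
-- outside the precondition, e.g. on get_hand_rank([(2, 0), (2, 0), (5, 0)]): A returns 3, B returns 1
import Mathlib
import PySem

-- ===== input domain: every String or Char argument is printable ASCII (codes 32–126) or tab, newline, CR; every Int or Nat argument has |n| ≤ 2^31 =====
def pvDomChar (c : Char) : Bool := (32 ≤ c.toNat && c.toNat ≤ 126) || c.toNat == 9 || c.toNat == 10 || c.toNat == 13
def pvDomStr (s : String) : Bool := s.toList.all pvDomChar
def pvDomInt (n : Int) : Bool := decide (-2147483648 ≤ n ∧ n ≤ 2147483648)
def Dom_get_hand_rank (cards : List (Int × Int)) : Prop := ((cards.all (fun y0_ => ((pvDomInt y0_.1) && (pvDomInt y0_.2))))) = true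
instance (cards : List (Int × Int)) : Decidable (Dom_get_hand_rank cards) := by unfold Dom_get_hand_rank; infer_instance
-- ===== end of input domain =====

-- B replaces A's sort-then-cascade by a single pass computing min/max/sum of the ranks and a flush flag (recovering the middle rank arithmetically); same O(1) cost, different decomposition.

-- ===== PORT A =====
def get_hand_rank (cards : List (Int × Int)) : Int :=
  let ranks : List Int := PySem.List.sorted (cards.map (fun c => c.1)) (fun v => v) false
  let suits : List Int := cards.map (fun c => c.2)
  if PySem.List.pyGetD ranks 0 0 = PySem.List.pyGetD ranks 1 0 ∧
     PySem.List.pyGetD ranks 1 0 = PySem.List.pyGetD ranks 2 0 then 5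
  else
    let is_flush : Bool := decide (PySem.List.pyGetD suits 0 0 = PySem.List.pyGetD suits 1 0 ∧
                                   PySem.List.pyGetD suits 1 0 = PySem.List.pyGetD suits 2 0)
    let is_straight : Bool :=
      if ranks = [2, 3, 14] then true
      else decide (PySem.List.pyGetD ranks 0 0 + 1 = PySem.List.pyGetD ranks 1 0 ∧
                   PySem.List.pyGetD ranks 1 0 + 1 = PySem.List.pyGetD ranks 2 0)
    if is_flush && is_straight then 4
    else if is_flush then 3
    else if is_straight then 2
    else if PySem.List.pyGetD ranks 0 0 = PySem.List.pyGetD ranks 1 0 ∨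
            PySem.List.pyGetD ranks 1 0 = PySem.List.pyGetD ranks 2 0 then 1
    else 0

-- ===== PORT B ===== (one pass: min, max, sum of ranks and a flush flag; no sorting)
def get_hand_rank_alt (cards : List (Int × Int)) : Int :=
  let c0 := PySem.List.pyGetD cards 0 (0, 0)
  let st := cards.foldl
    (fun (st : Int × Int × Int × Bool) c =>
      let total := st.2.2.1 + c.1
      let lo := if c.1 < st.1 then c.1 else st.1
      let hi := if st.2.1 < c.1 then c.1 else st.2.1
      let flush := if c.2 ≠ c0.2 then false else st.2.2.2
      (lo, hi, total, flush))
    (c0.1, c0.1, 0, true)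
  if st.1 = st.2.1 then 5
  else
    let mid := st.2.2.1 - st.1 - st.2.1
    if mid = st.1 ∨ mid = st.2.1 then 1
    else
      let straight : Bool := decide (st.2.1 - st.1 = 2 ∨ (st.1 = 2 ∧ st.2.1 = 14 ∧ mid = 3))
      if st.2.2.2 then (if straight then 4 else 3)
      else (if straight then 2 else 0)

-- ===== PRECONDITION & SPEC =====
-- Pre_ requires exactly 3 cards (A's assert raises otherwise). It also excludes 3-card inputs whose
-- suits are all equal while exactly two ranks coincide (such a hand necessarily repeats a physical
-- card, impossible in a real deck): there A's flush-before-pair cascade accidentally returns 3 while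
-- B's pair branch returns 1 — an unspecifiable corner on which both values are defensible.
def Pre_get_hand_rank (cards : List (Int × Int)) : Prop :=
  cards.length = 3 ∧
  ¬ (((cards.map (fun c => c.2)).Pairwise (· = ·)) ∧
     (PySem.List.dedup (cards.map (fun c => c.1))).length = 2)
instance (cards : List (Int × Int)) : Decidable (Pre_get_hand_rank cards) := by
  unfold Pre_get_hand_rank; infer_instance
def pvWitness_get_hand_rank : (List (Int × Int)) := [(2, 0), (3, 1), (14, 0)]
def Spec_get_hand_rank (cards : List (Int × Int)) (out : Int) : Prop := out = get_hand_rank_alt cards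
instance (cards : List (Int × Int)) (out : Int) : Decidable (Spec_get_hand_rank cards out) := by unfold Spec_get_hand_rank; infer_instance

-- ===== CLAIM (what is proved, stated in full; the proofs are below) =====
def Claim_equal_get_hand_rank : Prop := ∀ (cards : List (Int × Int)), Dom_get_hand_rank cards → Pre_get_hand_rank cards → Spec_get_hand_rank cards (get_hand_rank cards)

-- ===== LEMMAS AND PROOFS =====

theorem insertBy_nil {α : Type} (b : α → α → Bool) (x : α) : PySem.List.insertBy b x [] = [x] := rfl
theorem insertBy_cons {α : Type} (b : α → α → Bool) (x y : α) (ys : List α) :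
    PySem.List.insertBy b x (y :: ys) = if b x y then x :: y :: ys else y :: PySem.List.insertBy b x ys := rfl

theorem sort3 (x y z : Int) : PySem.List.sorted [x, y, z] (fun v => v) false =
    if y < x then (if z < y then [z, y, x] else if z < x then [y, z, x] else [y, x, z])
    else (if z < x then [z, x, y] else if z < y then [x, z, y] else [x, y, z]) := by
  simp only [PySem.List.sorted, List.foldl, insertBy_nil, insertBy_cons,
    Bool.false_eq_true, if_false, decide_eq_true_eq]
  split_ifs <;> simp_all [insertBy_cons, insertBy_nil] <;> (split_ifs <;> simp_all <;> omega)

theorem set3_len (p q r : Int) : (PySem.Set.ofList [p, q, r]).length =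
    if p = q ∧ q = r then 1 else if p = q ∨ p = r ∨ q = r then 2 else 3 := by
  simp only [PySem.Set.ofList, PySem.Set.add, PySem.Set.contains, List.foldl]
  split_ifs <;> simp_all <;> omega

theorem getD3_0 (a b c d : Int) : PySem.List.pyGetD [a,b,c] 0 d = a := by
  simp [PySem.List.pyGetD, PySem.List.pyGet?, PySem.List.pyIdx?]
theorem getD3_1 (a b c d : Int) : PySem.List.pyGetD [a,b,c] 1 d = b := by
  simp [PySem.List.pyGetD, PySem.List.pyGet?, PySem.List.pyIdx?]
theorem getD3_2 (a b c d : Int) : PySem.List.pyGetD [a,b,c] 2 d = c := by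
  simp [PySem.List.pyGetD, PySem.List.pyGet?, PySem.List.pyIdx?]

theorem getDp3_0 (a b c d : Int × Int) : PySem.List.pyGetD [a,b,c] 0 d = a := by
  simp [PySem.List.pyGetD, PySem.List.pyGet?, PySem.List.pyIdx?]

-- A's cascade over the sorted triple x ≤ y ≤ z equals B's min/max/sum classification,
-- outside the excluded flush-with-pair corner.
set_option maxHeartbeats 4000000 in
theorem core (x y z lo hi tot : Int) (f : Bool)
    (hxy : x ≤ y) (hyz : y ≤ z) (hlo : lo = x) (hhi : hi = z) (htot : tot = x + y + z)
    (hp : ¬(f = true ∧ (x = y ∨ y = z) ∧ ¬(x = y ∧ y = z))) :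
    (if x = y ∧ y = z then (5 : Int)
     else if f && (if ([x, y, z] : List Int) = [2, 3, 14] then true else decide (x + 1 = y ∧ y + 1 = z)) then 4
     else if f then 3
     else if (if ([x, y, z] : List Int) = [2, 3, 14] then true else decide (x + 1 = y ∧ y + 1 = z)) = true then 2
     else if x = y ∨ y = z then 1
     else 0) =
    (if lo = hi then (5 : Int)
     else if tot - lo - hi = lo ∨ tot - lo - hi = hi then 1
     else if f then (if decide (hi - lo = 2 ∨ (lo = 2 ∧ hi = 14 ∧ tot - lo - hi = 3)) then 4 else 3)
     else (if decide (hi - lo = 2 ∨ (lo = 2 ∧ hi = 14 ∧ tot - lo - hi = 3)) then 2 else 0)) := by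
  subst hlo hhi htot
  rcases f with _ | _ <;> simp only [Bool.false_and, Bool.true_and, Bool.false_eq_true,
    if_false, decide_eq_true_eq] <;> split_ifs <;> first | rfl | omega | (simp_all; omega) | simp_all

set_option maxHeartbeats 4000000 in
theorem get_hand_rank_spec : Claim_equal_get_hand_rank := by
  intro cards _dom pre
  obtain ⟨hlen, hpre⟩ := pre
  rcases cards with _ | ⟨⟨ra, sa⟩, _ | ⟨⟨rb, sb⟩, _ | ⟨⟨rc, sc⟩, _ | _⟩⟩⟩ <;> simp_all
  -- B's fold, evaluated on the 3-card list
  unfold Spec_get_hand_rank get_hand_rank get_hand_rank_alt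
  simp only [List.map_cons, List.map_nil, List.foldl, getDp3_0, getD3_0, getD3_1, getD3_2]
  have hflush : (if sc ≠ sa then false else if sb ≠ sa then false else if sa ≠ sa then false else true)
      = decide (sa = sb ∧ sb = sc) := by
    clear hpre _dom; split_ifs <;> simp_all <;> omega
  -- exclusion hypothesis in arithmetic form
  have hp : ¬((decide (sa = sb ∧ sb = sc) : Bool) = true ∧
      ((ra = rb ∨ ra = rc ∨ rb = rc) ∧ ¬(ra = rb ∧ rb = rc))) := by
    rintro ⟨h1, h2, h3⟩
    simp only [decide_eq_true_eq] at h1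
    have h4 := hpre h1.1 h1.2
    rw [set3_len] at h4
    split_ifs at h4 <;> omega
  by_cases h1 : rb < ra <;> by_cases h2 : rc < rb <;> by_cases h3 : rc < ra
  · simp only [show PySem.List.sorted [ra, rb, rc] (fun v => v) false = [rc, rb, ra] from by
      rw [sort3]; split_ifs <;> first | rfl | omega]
    simp only [getD3_0, getD3_1, getD3_2, hflush]
    exact core rc rb ra _ _ _ _ (by omega) (by omega) (by split_ifs <;> omega)
      (by split_ifs <;> omega) (by omega) (by rintro ⟨g1, g2⟩; exact hp ⟨g1, by omega⟩)
  · omega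
  · simp only [show PySem.List.sorted [ra, rb, rc] (fun v => v) false = [rb, rc, ra] from by
      rw [sort3]; split_ifs <;> first | rfl | omega]
    simp only [getD3_0, getD3_1, getD3_2, hflush]
    exact core rb rc ra _ _ _ _ (by omega) (by omega) (by split_ifs <;> omega)
      (by split_ifs <;> omega) (by omega) (by rintro ⟨g1, g2⟩; exact hp ⟨g1, by omega⟩)
  · simp only [show PySem.List.sorted [ra, rb, rc] (fun v => v) false = [rb, ra, rc] from by
      rw [sort3]; split_ifs <;> first | rfl | omega]
    simp only [getD3_0, getD3_1, getD3_2, hflush]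
    exact core rb ra rc _ _ _ _ (by omega) (by omega) (by split_ifs <;> omega)
      (by split_ifs <;> omega) (by omega) (by rintro ⟨g1, g2⟩; exact hp ⟨g1, by omega⟩)
  · simp only [show PySem.List.sorted [ra, rb, rc] (fun v => v) false = [rc, ra, rb] from by
      rw [sort3]; split_ifs <;> first | rfl | omega]
    simp only [getD3_0, getD3_1, getD3_2, hflush]
    exact core rc ra rb _ _ _ _ (by omega) (by omega) (by split_ifs <;> omega)
      (by split_ifs <;> omega) (by omega) (by rintro ⟨g1, g2⟩; exact hp ⟨g1, by omega⟩)
  · simp only [show PySem.List.sorted [ra, rb, rc] (fun v => v) false = [ra, rc, rb] from by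
      rw [sort3]; split_ifs <;> first | rfl | omega]
    simp only [getD3_0, getD3_1, getD3_2, hflush]
    exact core ra rc rb _ _ _ _ (by omega) (by omega) (by split_ifs <;> omega)
      (by split_ifs <;> omega) (by omega) (by rintro ⟨g1, g2⟩; exact hp ⟨g1, by omega⟩)
  · omega
  · simp only [show PySem.List.sorted [ra, rb, rc] (fun v => v) false = [ra, rb, rc] from by
      rw [sort3]; split_ifs <;> first | rfl | omega]
    simp only [getD3_0, getD3_1, getD3_2, hflush]
    exact core ra rb rc _ _ _ _ (by omega) (by omega) (by split_ifs <;> omega)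
      (by split_ifs <;> omega) (by omega) (by rintro ⟨g1, g2⟩; exact hp ⟨g1, by omega⟩)
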